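-- pv_equiv track=rewrite | github.com/asafkessler/6130_Python | course_6130/EX1/ex1.py | max_count1
-- ===== SOURCE A (Python) =====
-- def max_count1(list_of_numbers):
--     """
--     Returns the biggest number in a list and the numbers of times it appears.
--     :param list_of_numbers: list of numbers.
--     :return: returns max value and amount of instances.
--     """
--     max1 = list_of_numbers[0]
--     count_max = 0
--     for i in range(len(list_of_numbers)):
--         if list_of_numbers[i] > max1:
--             max1 = list_of_numbers[i]
--             count_max = 1
--         elif list_of_numbers[i] == max1:
--             count_max += 1
--         else:
--             continue
--
--     L_max = list([max1, count_max])
--     return L_max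
-- ===== SOURCE B (Python) =====
-- def max_count1(list_of_numbers):
--     m = list_of_numbers[0]
--     for x in list_of_numbers[1:]:
--         if x > m:
--             m = x
--     return [m, list_of_numbers.count(m)]
-- ===== Notes on version B (the rewrite author's own statement) =====
-- stated objective: simpler
-- what changed: A's single combined max+count loop is split into a max-only loop over the tail followed by a separate counting pass with list.count.
import Mathlib
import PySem

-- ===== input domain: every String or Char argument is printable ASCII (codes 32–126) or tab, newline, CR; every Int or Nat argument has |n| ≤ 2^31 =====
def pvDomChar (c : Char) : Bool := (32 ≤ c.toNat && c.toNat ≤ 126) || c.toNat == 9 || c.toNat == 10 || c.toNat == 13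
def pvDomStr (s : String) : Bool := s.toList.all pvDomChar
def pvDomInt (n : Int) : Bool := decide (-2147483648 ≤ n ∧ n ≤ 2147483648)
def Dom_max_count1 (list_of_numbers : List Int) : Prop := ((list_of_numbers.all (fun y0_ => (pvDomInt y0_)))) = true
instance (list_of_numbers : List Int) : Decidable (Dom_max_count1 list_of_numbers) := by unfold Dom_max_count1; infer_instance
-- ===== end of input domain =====

-- B replaces A's single combined max+count pass by a max-only loop plus a separate list.count pass (objective: simpler).

-- ===== PORT A =====
-- A: seed max1 = xs[0], count = 0, then one pass updating (max1, count) per element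
-- (iterating `list_of_numbers[i] for i in range(len(...))` is exactly element order).
def max_count1 (list_of_numbers : List Int) : List Int :=
  match list_of_numbers with
  | [] => []   -- Python raises IndexError here; excluded by Pre_max_count1
  | h :: _ =>
    let s := list_of_numbers.foldl
      (fun (s : Int × Int) x =>
        if x > s.1 then (x, 1)
        else if x == s.1 then (s.1, s.2 + 1)
        else s) (h, 0)
    [s.1, s.2]

-- ===== PORT B =====
def max_count1_alt (list_of_numbers : List Int) : List Int :=
  match list_of_numbers with
  | [] => []   -- Python raises IndexError here; excluded by Pre_max_count1
  | h :: t =>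
    -- for x in list_of_numbers[1:]: if x > m: m = x   (the slice [1:] of h::t is t)
    let m := t.foldl (fun m x => if x > m then x else m) h
    [m, PySem.List.count list_of_numbers m]

-- ===== PRECONDITION & SPEC =====
-- A raises IndexError on the empty list (list_of_numbers[0]); B does too.
def Pre_max_count1 (list_of_numbers : List Int) : Prop := list_of_numbers ≠ []
instance (list_of_numbers : List Int) : Decidable (Pre_max_count1 list_of_numbers) := by unfold Pre_max_count1; infer_instance
def pvWitness_max_count1 : List Int := [3, 1, 3]

def Spec_max_count1 (list_of_numbers : List Int) (out : List Int) : Prop := out = max_count1_alt list_of_numbers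
instance (list_of_numbers : List Int) (out : List Int) : Decidable (Spec_max_count1 list_of_numbers out) := by unfold Spec_max_count1; infer_instance

-- ===== CLAIM (what is proved, stated in full; the proofs are below) =====
def Claim_equal_max_count1 : Prop := ∀ (list_of_numbers : List Int), Dom_max_count1 list_of_numbers → Pre_max_count1 list_of_numbers → Spec_max_count1 list_of_numbers (max_count1 list_of_numbers)

-- ===== LEMMAS AND PROOFS =====

def pvFmax (m : Int) (l : List Int) : Int := l.foldl (fun m x => if x > m then x else m) m

lemma pvFmax_le (m : Int) (l : List Int) : m ≤ pvFmax m l := by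
  induction l generalizing m with
  | nil => simp [pvFmax]
  | cons x t ih =>
    simp only [pvFmax, List.foldl_cons]
    by_cases h : x > m
    · simp only [if_pos h]
      exact le_trans (le_of_lt h) (ih x)
    · simp only [if_neg h]; exact ih m

lemma pvAfold_eq (l : List Int) (m c : Int) :
    l.foldl
      (fun (s : Int × Int) x =>
        if x > s.1 then (x, 1)
        else if x == s.1 then (s.1, s.2 + 1)
        else s) (m, c)
    = (pvFmax m l,
       if pvFmax m l = m then c + (l.count m : Int) else ((l.count (pvFmax m l) : Int))) := by
  induction l generalizing m c with
  | nil => simp [pvFmax]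
  | cons x t ih =>
    simp only [List.foldl_cons, pvFmax, List.count_cons]
    by_cases hgt : x > m
    · simp only [if_pos hgt]
      rw [ih x 1]
      have hle : x ≤ pvFmax x t := pvFmax_le x t
      have hne : pvFmax x t ≠ m := by
        intro h; rw [h] at hle; omega
      simp only [pvFmax] at hne ⊢
      rw [if_neg hne]
      by_cases hx : t.foldl (fun m x => if x > m then x else m) x = x
      · simp only [if_pos hx, hx, beq_self_eq_true, if_pos]
        push_cast; ring
      · simp only [if_neg hx]
        have : ¬ (x == t.foldl (fun m x => if x > m then x else m) x) := by
          simp only [beq_iff_eq]; intro h; exact hx h.symm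
        simp [this]
    · simp only [if_neg hgt]
      by_cases heq : x = m
      · simp only [heq, beq_self_eq_true, if_pos, if_true]
        rw [ih m (c + 1)]
        by_cases hm : pvFmax m t = m
        · simp only [pvFmax] at hm
          simp [pvFmax, hm]
          push_cast
          omega
        · simp only [pvFmax] at hm
          have hlt : m < t.foldl (fun m x => if x > m then x else m) m := by
            have := pvFmax_le m t; simp only [pvFmax] at this; omega
          have : ¬ ((t.foldl (fun m x => if x > m then x else m) m) == m) := by
            simp only [beq_iff_eq]; exact fun h => hm h
          simp [pvFmax, hm, this, Ne.symm (ne_of_gt hlt)]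
      · have hbeq : ¬ (x == m) := by simp [heq]
        simp only [if_neg hbeq, Bool.false_eq_true, if_false]
        rw [ih m c]
        have hlt : x < m := by omega
        have hM : x ≠ pvFmax m t := by
          have := pvFmax_le m t; omega
        have hbne : ¬ (x == pvFmax m t) := by simp [hM]
        simp only [pvFmax] at hbne hbeq ⊢
        simp [hbeq, hbne]

theorem max_count1_spec : Claim_equal_max_count1 := by
  intro xs _ hpre
  unfold Spec_max_count1 max_count1 max_count1_alt
  match xs with
  | [] => exact absurd rfl hpre
  | h :: t =>
    simp only [List.foldl_cons]
    have hself : ¬ (h > h) := lt_irrefl h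
    rw [if_neg hself, if_pos (beq_self_eq_true h ▸ rfl)]
    simp only [zero_add]
    rw [pvAfold_eq t h 1]
    rw [PySem.List.count_eq]
    by_cases hm : pvFmax h t = h
    · simp only [pvFmax] at hm
      simp [pvFmax, hm, List.count_cons]
      push_cast
      omega
    · have hlt : h < pvFmax h t := by
        have := pvFmax_le h t; omega
      have hne : ¬ ((pvFmax h t) == h) := by
        simp only [beq_iff_eq]; exact fun h' => hm h'
      simp only [pvFmax] at hm hne hlt ⊢
      simp [hm, List.count_cons, hne, Ne.symm (ne_of_gt hlt)]
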